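-- pv_equiv track=rewrite | github.com/asrsolarpatna113/asrenterprisescashfree | backend/routes/whatsapp_automation.py | is_greeting_message
-- ===== SOURCE A (Python) =====
-- GREETING_KEYWORDS = [
--     "hi", "hello", "hey", "hola", "namaste", "namaskar",
--     "good morning", "good afternoon", "good evening",
--     "hii", "hiii", "hiiii", "helloo", "hellooo",
--     "start", "begin", "menu"
-- ]
--
-- def is_greeting_message(content: str) -> bool:
--     """Check if message is a greeting/starting message"""
--     content_lower = content.lower().strip()
--
--     # Check exact matches first
--     if content_lower in GREETING_KEYWORDS:
--         return True
--
--     # Check if message starts with a greeting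
--     for greeting in GREETING_KEYWORDS:
--         if content_lower.startswith(greeting + " ") or content_lower.startswith(greeting + ","):
--             return True
--
--     return False
-- ===== SOURCE B (Python) =====
-- GREETING_KEYWORDS = [
--     "hi", "hello", "hey", "hola", "namaste", "namaskar",
--     "good morning", "good afternoon", "good evening",
--     "hii", "hiii", "hiiii", "helloo", "hellooo",
--     "start", "begin", "menu"
-- ]
--
-- _KWSET = frozenset(GREETING_KEYWORDS)
--
-- def is_greeting_message(content: str) -> bool:
--     """Check if message is a greeting/starting message"""
--     s = content.lower().strip()
--     # single pass: at each ' ' or ',' boundary test the prefix before it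
--     for i, c in enumerate(s):
--         if c in " ," and s[:i] in _KWSET:
--             return True
--     return s in _KWSET
-- ===== Notes on version B (the rewrite author's own statement) =====
-- stated objective: alternative
-- what changed: Replaces the exact-membership check plus per-keyword startswith loop with a single left-to-right scan over the string that tests the prefix before each space/comma boundary (and the whole string at the end) against a keyword set.
import Mathlib
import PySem

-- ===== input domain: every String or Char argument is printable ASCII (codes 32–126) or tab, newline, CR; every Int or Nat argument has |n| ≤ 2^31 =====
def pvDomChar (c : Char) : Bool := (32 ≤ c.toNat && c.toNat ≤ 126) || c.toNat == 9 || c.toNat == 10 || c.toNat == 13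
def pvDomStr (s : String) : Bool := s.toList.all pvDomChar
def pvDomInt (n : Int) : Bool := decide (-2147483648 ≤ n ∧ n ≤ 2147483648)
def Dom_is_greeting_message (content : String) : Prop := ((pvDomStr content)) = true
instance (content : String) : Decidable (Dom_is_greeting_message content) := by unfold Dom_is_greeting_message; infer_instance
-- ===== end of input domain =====

-- B replaces the membership check + per-keyword startswith loop by a single scan over the
-- string testing the prefix before each space/comma boundary against the keyword set (alternative decomposition).


-- ===== PORT A =====
def GREETING_KEYWORDS : List String :=
  ["hi", "hello", "hey", "hola", "namaste", "namaskar",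
   "good morning", "good afternoon", "good evening",
   "hii", "hiii", "hiiii", "helloo", "hellooo",
   "start", "begin", "menu"]

-- the keyword list as char lists (string functions are proved on the List Char side)
def kwChars : List (List Char) := GREETING_KEYWORDS.map String.toList

def is_greeting_message (content : String) : Bool :=
  let cl := PySem.Chars.strip (PySem.Chars.lower content.toList)
  if kwChars.contains cl then true
  else kwChars.any (fun g =>
    PySem.Chars.startswith cl (g ++ [' ']) || PySem.Chars.startswith cl (g ++ [',']))

-- ===== PORT B =====
-- single pass: at each ' ' or ',' boundary test the accumulated prefix; at the end the whole string
def altScan (acc : List Char) (rest : List Char) : Bool :=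
  match rest with
  | [] => kwChars.contains acc
  | c :: rs =>
    if (c = ' ' || c = ',') && kwChars.contains acc then true
    else altScan (acc ++ [c]) rs

def is_greeting_message_alt (content : String) : Bool :=
  altScan [] (PySem.Chars.strip (PySem.Chars.lower content.toList))

-- ===== PRECONDITION & SPEC =====
def Spec_is_greeting_message (content : String) (out : Bool) : Prop := out = is_greeting_message_alt content
instance (content : String) (out : Bool) : Decidable (Spec_is_greeting_message content out) := by unfold Spec_is_greeting_message; infer_instance

-- ===== CLAIM (what is proved, stated in full; the proofs are below) =====
def Claim_equal_is_greeting_message : Prop := ∀ (content : String), Dom_is_greeting_message content → Spec_is_greeting_message content (is_greeting_message content)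

-- ===== LEMMAS AND PROOFS =====

lemma altScan_iff (rest : List Char) : ∀ acc,
    altScan acc rest = true ↔
      (acc ++ rest) ∈ kwChars ∨
      ∃ p c q, rest = p ++ c :: q ∧ (c = ' ' ∨ c = ',') ∧ (acc ++ p) ∈ kwChars := by
  induction rest with
  | nil =>
    intro acc
    simp [altScan]
  | cons c rs ih =>
    intro acc
    simp only [altScan]
    split
    · rename_i h
      simp only [Bool.and_eq_true, Bool.or_eq_true, decide_eq_true_eq,
        List.contains_iff_mem] at h
      constructor
      · intro _
        exact Or.inr ⟨[], c, rs, by simp, h.1, by simpa using h.2⟩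
      · intro _; rfl
    · rename_i h
      simp only [Bool.and_eq_true, Bool.or_eq_true, decide_eq_true_eq,
        List.contains_iff_mem, not_and] at h
      rw [ih]
      constructor
      · rintro (hm | ⟨p, c', q, hrs, hc', hmem⟩)
        · exact Or.inl (by simpa using hm)
        · exact Or.inr ⟨c :: p, c', q, by simp [hrs], hc', by simpa using hmem⟩
      · rintro (hm | ⟨p, c', q, hrs, hc', hmem⟩)
        · exact Or.inl (by simpa using hm)
        · cases p with
          | nil =>
            obtain ⟨hc, hq⟩ := List.cons.inj hrs
            exact absurd (by simpa using hmem) (h (hc ▸ hc'))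
          | cons x p' =>
            obtain ⟨hx, hrs'⟩ := List.cons.inj hrs
            subst hx
            exact Or.inr ⟨p', c', q, hrs', hc', by simpa using hmem⟩

lemma a_body_iff (s : List Char) :
    (if kwChars.contains s then true
     else kwChars.any (fun g =>
       PySem.Chars.startswith s (g ++ [' ']) || PySem.Chars.startswith s (g ++ [',']))) = true ↔
      s ∈ kwChars ∨
      ∃ p c q, s = p ++ c :: q ∧ (c = ' ' ∨ c = ',') ∧ p ∈ kwChars := by
  split
  · rename_i h
    simp only [List.contains_iff_mem] at h
    simp [h]
  · rename_i h
    simp only [List.contains_iff_mem] at h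
    simp only [List.any_eq_true, Bool.or_eq_true, PySem.Chars.startswith_iff]
    constructor
    · rintro ⟨g, hg, hpre | hpre⟩
      · obtain ⟨t, ht⟩ := hpre
        exact Or.inr ⟨g, ' ', t, by rw [← ht]; simp, Or.inl rfl, hg⟩
      · obtain ⟨t, ht⟩ := hpre
        exact Or.inr ⟨g, ',', t, by rw [← ht]; simp, Or.inr rfl, hg⟩
    · rintro (hm | ⟨p, c, q, hs, hc, hp⟩)
      · exact absurd hm h
      · refine ⟨p, hp, ?_⟩
        rcases hc with hc | hc <;> subst hc <;> [exact Or.inl ⟨q, by simp [hs]⟩; exact Or.inr ⟨q, by simp [hs]⟩]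

-- ===== VERDICT (by name: the statement is the Claim_ definition above) =====
theorem is_greeting_message_spec : Claim_equal_is_greeting_message := by
  intro content _
  unfold Spec_is_greeting_message is_greeting_message is_greeting_message_alt
  rw [Bool.eq_iff_iff]
  exact (a_body_iff _).trans ((altScan_iff _ []).symm.trans Iff.rfl)
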